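-- pv_equiv track=rewrite | github.com/Muntasir00/Codeforces_solution_python3 | 149A.py | solve
-- ===== SOURCE A (Python) =====
-- def solve(k, i_list):
--     k1 = months = 0
--     if k ==0:
--         return months
--     i_list.sort(reverse=True)
--     for i in i_list:
--         if k1 >= k:
--             break
--         else:
--             k1 += i
--             months +=1
--     if k1 >= k:
--         return months
--     else:
--         return -1
-- ===== SOURCE B (Python) =====
-- def solve(k, i_list):
--     remaining = list(i_list)
--     total = 0
--     months = 0
--     while total < k:
--         if not remaining:
--             return -1
--         m = max(remaining)
--         remaining.remove(m)
--         total += m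
--         months += 1
--     return months
-- ===== Notes on version B (the rewrite author's own statement) =====
-- stated objective: alternative
-- what changed: Replaces A's sort-then-scan greedy (sort descending, accumulate prefix until >= k) by sort-free repeated maximum extraction: a while-loop that on each month pops the current maximum from a working copy of the list until the running total reaches k.
import Mathlib
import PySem

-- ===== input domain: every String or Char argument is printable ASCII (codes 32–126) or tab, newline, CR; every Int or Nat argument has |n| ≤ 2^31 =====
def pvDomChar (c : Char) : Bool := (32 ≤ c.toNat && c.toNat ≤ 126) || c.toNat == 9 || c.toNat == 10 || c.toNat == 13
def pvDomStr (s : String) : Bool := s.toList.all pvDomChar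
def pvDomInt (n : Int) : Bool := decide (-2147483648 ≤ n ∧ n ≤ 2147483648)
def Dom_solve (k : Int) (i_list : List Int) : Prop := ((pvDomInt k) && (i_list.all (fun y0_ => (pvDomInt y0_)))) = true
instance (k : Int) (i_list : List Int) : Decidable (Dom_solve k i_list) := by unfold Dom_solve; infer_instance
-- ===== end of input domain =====

-- B replaces A's sort-then-accumulate greedy by sort-free repeated maximum extraction
-- (pop the current max from a working copy each month); return values proved equal on all inputs.
-- Side effects differ: A sorts i_list in place (except when k == 0), B works on a copy and never
-- mutates i_list; the equivalence proved here is about the RETURN value only.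


-- ===== PORT A =====
-- A's for-loop with break: carries (k1, months), stops when k1 >= k
def solveLoopA (k : Int) : Int → Int → List Int → Int × Int
  | k1, months, [] => (k1, months)
  | k1, months, i :: rest =>
      if k1 ≥ k then (k1, months) else solveLoopA k (k1 + i) (months + 1) rest

def solve (k : Int) (i_list : List Int) : Int :=
  let k1 : Int := 0
  let months : Int := 0
  if k = 0 then months
  else
    let sortedList := PySem.List.sorted i_list (fun x => x) true
    let res := solveLoopA k k1 months sortedList
    if res.1 ≥ k then res.2 else -1

-- ===== PORT B =====
-- B's while-loop: while total < k, pop max(remaining) (Python max = first max; remove = first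
-- occurrence), add it to total, count a month; -1 when remaining runs out.
def solveLoopB (k : Int) (total months : Int) (remaining : List Int) : Int :=
  if total < k then
    match hm : PySem.List.max? remaining (fun y => y) with
    | none => -1
    | some m =>
      match hr : PySem.List.remove? remaining m with
      | none => -1   -- unreachable: max is a member
      | some rest => solveLoopB k (total + m) (months + 1) rest
  else months
termination_by remaining.length
decreasing_by
  have hmem : m ∈ remaining := PySem.List.max?_mem hm
  rw [PySem.List.remove?_eq_some_erase remaining m hmem] at hr
  injection hr with hr
  subst hr
  rw [List.length_erase_of_mem hmem]
  exact Nat.sub_lt (List.length_pos_of_mem hmem) one_pos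

def solve_alt (k : Int) (i_list : List Int) : Int :=
  solveLoopB k 0 0 i_list

-- ===== PRECONDITION & SPEC =====
def Spec_solve (k : Int) (i_list : List Int) (out : Int) : Prop := out = solve_alt k i_list
instance (k : Int) (i_list : List Int) (out : Int) : Decidable (Spec_solve k i_list out) := by unfold Spec_solve; infer_instance

-- ===== CLAIM (what is proved, stated in full; the proofs are below) =====
def Claim_equal_solve : Prop := ∀ (k : Int) (i_list : List Int), Dom_solve k i_list → Spec_solve k i_list (solve k i_list)

-- ===== LEMMAS AND PROOFS =====

-- Descending stable sort decomposes as: the max, then the sorted remainder after erasing one max.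
theorem sorted_rev_cons_max (l : List Int) (m : Int)
    (hm : PySem.List.max? l (fun y => y) = some m) :
    PySem.List.sorted l (fun x => x) true = m :: PySem.List.sorted (l.erase m) (fun x => x) true := by
  have hmem : m ∈ l := PySem.List.max?_mem hm
  have hmax : ∀ y ∈ l, y ≤ m := PySem.List.max?_isMax hm
  obtain ⟨h, t, hs⟩ : ∃ h t, PySem.List.sorted l (fun x => x) true = h :: t := by
    cases hsl : PySem.List.sorted l (fun x => x) true with
    | nil => exact absurd ((PySem.List.sorted_eq_nil_iff l (fun x => x) true).mp hsl ▸ hmem) (List.not_mem_nil)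
    | cons h t => exact ⟨h, t, rfl⟩
  have hperm : (h :: t).Perm l := hs ▸ PySem.List.sorted_perm l (fun x => x) true
  have hhl : h ∈ l := hperm.mem_iff.mp (List.mem_cons_self)
  have hhm : h = m := le_antisymm (hmax h hhl)
      (PySem.List.key_head_sorted_rev_ge (xs := l) (key := fun x => x) hs m hmem)
  subst hhm
  rw [hs]
  congr 1
  -- t and sorted (l.erase h) are permutations of each other and both sorted descending ⇒ equal
  have hpt : t.Perm (l.erase h) :=
    (List.perm_cons h).mp (hperm.trans (List.perm_cons_erase hhl))
  have hps : (PySem.List.sorted (l.erase h) (fun x => x) true).Perm t :=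
    ((PySem.List.sorted_perm (l.erase h) (fun x => x) true).trans hpt.symm)
  have hsort_t : t.Pairwise (fun a b : Int => b ≤ a) :=
    ((hs ▸ PySem.List.sorted_pairwise_rev l (fun x => x)).sublist (List.sublist_cons_self h t))
  have hsort_s : (PySem.List.sorted (l.erase h) (fun x => x) true).Pairwise (fun a b : Int => b ≤ a) :=
    PySem.List.sorted_pairwise_rev (l.erase h) (fun x => x)
  exact (List.Perm.eq_of_pairwise (fun a b _ _ h1 h2 => le_antisymm h2 h1) hsort_s hsort_t hps).symm

-- B's extraction loop equals A's loop over the descending-sorted list, followed by A's final test.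
theorem loopB_eq_loopA (k : Int) : ∀ (n : Nat) (l : List Int), l.length = n → ∀ (total months : Int),
    solveLoopB k total months l =
      (if (solveLoopA k total months (PySem.List.sorted l (fun x => x) true)).1 ≥ k
       then (solveLoopA k total months (PySem.List.sorted l (fun x => x) true)).2 else -1) := by
  intro n
  induction n with
  | zero =>
      intro l hl total months
      rw [List.length_eq_zero_iff.mp hl, solveLoopB.eq_def]
      by_cases h : total < k
      · simp [solveLoopA, PySem.List.max?, PySem.List.sorted, h, not_le.mpr h]
      · simp [solveLoopA, PySem.List.sorted, h, not_lt.mp h]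
  | succ n ih =>
      intro l hl total months
      by_cases h : total < k
      · cases l with
        | nil => simp at hl
        | cons x xs =>
          obtain ⟨m, hm⟩ : ∃ m, PySem.List.max? (x :: xs) (fun y => y) = some m := by
            cases hmx : PySem.List.max? (x :: xs) (fun y => y) with
            | none => exact absurd ((PySem.List.max?_eq_none_iff (x :: xs) (fun y => y)).mp hmx) (by simp)
            | some m => exact ⟨m, rfl⟩
          have hmem : m ∈ x :: xs := PySem.List.max?_mem hm
          have hrem : PySem.List.remove? (x :: xs) m = some ((x :: xs).erase m) :=
            PySem.List.remove?_eq_some_erase (x :: xs) m hmem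
          have hlen : ((x :: xs).erase m).length = n := by
            rw [List.length_erase_of_mem hmem]
            simp only [List.length_cons] at hl ⊢
            omega
          rw [solveLoopB.eq_def]
          simp only [if_pos h]
          split
          next heq => rw [hm] at heq; simp at heq
          next m' heq =>
            rw [hm] at heq
            injection heq with heq
            subst heq
            split
            next heq2 => rw [hrem] at heq2; simp at heq2
            next rest heq2 =>
              rw [hrem] at heq2
              injection heq2 with heq2
              subst heq2
              rw [ih _ hlen (total + m) (months + 1),
                  sorted_rev_cons_max (x :: xs) m hm]
              simp [solveLoopA, not_le.mpr h]
      · have h' : total ≥ k := not_lt.mp h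
        rw [solveLoopB.eq_def]
        simp only [if_neg h]
        cases hsl : PySem.List.sorted l (fun x => x) true with
        | nil => simp [solveLoopA, h']
        | cons y ys => simp [solveLoopA, h']

-- ===== VERDICT (by name: the statement is the Claim_ definition above) =====
theorem solve_spec : Claim_equal_solve := by
  intro k i_list _
  unfold Spec_solve solve solve_alt
  rw [loopB_eq_loopA k i_list.length i_list rfl 0 0]
  by_cases hk : k = 0
  · subst hk
    cases hsl : PySem.List.sorted i_list (fun x => x) true with
    | nil => simp [solveLoopA]
    | cons y ys => simp [solveLoopA]
  · simp [hk]
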